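-- pv_equiv track=rewrite | github.com/leifer98/ATM | ex5_tester.py | generate_quot_geo_series
-- ===== SOURCE A (Python) =====
-- def generate_quot_geo_series(first_term, initial_quotient, common_ratio, num_terms):
--     # Initialize the series list with the first term
--     series = [first_term]
--
--     # Initialize the first quotient
--     current_quotient = initial_quotient
--
--     for i in range(1, num_terms):
--         # Calculate the next term in the series
--         next_term = series[-1] * current_quotient
--         # Append the next term to the series
--         series.append(next_term)
--         # Update the quotient for the next iteration
--         current_quotient *= common_ratio
--
--     return series
-- ===== SOURCE B (Python) =====
-- def generate_quot_geo_series(first_term, initial_quotient, common_ratio, num_terms):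
--     # Two passes: first build the list of multipliers (first_term, then the
--     # successive quotients), then turn it into the series by a running product.
--     multipliers = [first_term]
--     q = initial_quotient
--     for _ in range(max(num_terms - 1, 0)):
--         multipliers.append(q)
--         q *= common_ratio
--     series = []
--     acc = 1
--     for m in multipliers:
--         acc *= m
--         series.append(acc)
--     return series
-- ===== Notes on version B (the rewrite author's own statement) =====
-- stated objective: alternative
-- what changed: Splits A's single fused loop (which recomputes series[-1] and updates the quotient in lockstep) into two independent passes: first build the multiplier list [first_term, q, q*r, q*r^2, ...], then turn it into the series with a running cumulative product.
import Mathlib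
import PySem

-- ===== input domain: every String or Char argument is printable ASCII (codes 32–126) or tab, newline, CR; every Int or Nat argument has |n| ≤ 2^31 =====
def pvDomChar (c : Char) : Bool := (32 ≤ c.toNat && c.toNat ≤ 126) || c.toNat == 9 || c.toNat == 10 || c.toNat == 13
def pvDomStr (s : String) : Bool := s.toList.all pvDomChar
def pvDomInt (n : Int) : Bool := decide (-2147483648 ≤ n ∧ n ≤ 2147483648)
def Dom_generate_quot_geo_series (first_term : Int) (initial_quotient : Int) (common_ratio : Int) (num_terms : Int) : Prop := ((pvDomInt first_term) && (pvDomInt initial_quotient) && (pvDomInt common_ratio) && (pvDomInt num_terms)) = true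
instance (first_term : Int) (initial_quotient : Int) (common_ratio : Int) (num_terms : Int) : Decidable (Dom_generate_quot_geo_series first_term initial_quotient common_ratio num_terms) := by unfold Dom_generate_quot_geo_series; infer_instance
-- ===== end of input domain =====

-- B splits A's fused loop into two passes — build the multiplier list (first term, then the running
-- quotients), then a running-product pass over it — same results, a different decomposition.


-- ===== PORT A =====
def generate_quot_geo_series (first_term : Int) (initial_quotient : Int) (common_ratio : Int) (num_terms : Int) : List Int :=
  -- series = [first_term]; current_quotient = initial_quotient; for i in range(1, num_terms): …
  (((PySem.List.pyRange 1 num_terms 1).foldl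
      (fun (st : List Int × Int) _i =>
        -- next_term = series[-1] * current_quotient; series.append(next_term); current_quotient *= common_ratio
        (st.1 ++ [PySem.List.pyGetD st.1 (-1) 0 * st.2], st.2 * common_ratio))
      ([first_term], initial_quotient))).1

-- ===== PORT B =====
def generate_quot_geo_series_alt (first_term : Int) (initial_quotient : Int) (common_ratio : Int) (num_terms : Int) : List Int :=
  -- pass 1: multipliers = [first_term]; q = initial_quotient; for _ in range(max(num_terms-1, 0)): append q; q *= common_ratio
  let st1 := (PySem.List.pyRange 0 (max (num_terms - 1) 0) 1).foldl
      (fun (st : List Int × Int) _ => (st.1 ++ [st.2], st.2 * common_ratio))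
      ([first_term], initial_quotient)
  let multipliers := st1.1
  -- pass 2: series = []; acc = 1; for m in multipliers: acc *= m; series.append(acc)
  (multipliers.foldl
      (fun (st : List Int × Int) m => (st.1 ++ [st.2 * m], st.2 * m))
      (([] : List Int), 1)).1

-- ===== PRECONDITION & SPEC =====
def Spec_generate_quot_geo_series (first_term : Int) (initial_quotient : Int) (common_ratio : Int) (num_terms : Int) (out : List Int) : Prop := out = generate_quot_geo_series_alt first_term initial_quotient common_ratio num_terms
instance (first_term : Int) (initial_quotient : Int) (common_ratio : Int) (num_terms : Int) (out : List Int) : Decidable (Spec_generate_quot_geo_series first_term initial_quotient common_ratio num_terms out) := by unfold Spec_generate_quot_geo_series; infer_instance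

-- ===== CLAIM (what is proved, stated in full; the proofs are below) =====
def Claim_equal_generate_quot_geo_series : Prop := ∀ (first_term : Int) (initial_quotient : Int) (common_ratio : Int) (num_terms : Int), Dom_generate_quot_geo_series first_term initial_quotient common_ratio num_terms → Spec_generate_quot_geo_series first_term initial_quotient common_ratio num_terms (generate_quot_geo_series first_term initial_quotient common_ratio num_terms)

-- ===== LEMMAS AND PROOFS =====

-- triangular numbers: pvT k = 0 + 1 + … + (k-1)
def pvT : Nat → Nat
  | 0 => 0
  | k + 1 => pvT k + k

-- the common closed form both ports are reduced to: term k of the series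
def pvF (f q r : Int) (k : Nat) : Int := f * q ^ k * r ^ pvT k

lemma pvF_succ (f q r : Int) (m : Nat) :
    pvF f q r m * (q * r ^ m) = pvF f q r (m + 1) := by
  simp only [pvF, pvT, pow_succ, pow_add]; ring

-- A's fused loop produces the closed-form series and the running quotient q * r^m
lemma loopA_eq (f q r : Int) (m : Nat) :
    ((List.range m).map (fun k : Nat => (1 : Int) + k)).foldl
      (fun (st : List Int × Int) _i =>
        (st.1 ++ [PySem.List.pyGetD st.1 (-1) 0 * st.2], st.2 * r))
      ([f], q)
    = ((List.range (m + 1)).map (pvF f q r), q * r ^ m) := by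
  induction m with
  | zero =>
    simp [pvF, pvT, List.range_succ]
  | succ m ih =>
    rw [List.range_succ, List.map_append, List.foldl_append, ih]
    simp only [List.map_cons, List.map_nil, List.foldl_cons, List.foldl_nil]
    have hlast : (List.range (m + 1)).map (pvF f q r)
        = ((List.range m).map (pvF f q r)) ++ [pvF f q r m] := by
      rw [List.range_succ, List.map_append]; rfl
    rw [hlast, PySem.List.pyGetD_neg_one_append_singleton]
    simp only [Prod.mk.injEq]
    refine ⟨?_, by rw [pow_succ]; ring⟩
    rw [pvF_succ, List.range_succ (n := m + 1), List.map_append, hlast, List.append_assoc]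
    simp

lemma a_eq_map (f q r n : Int) :
    generate_quot_geo_series f q r n
      = (List.range (max n 1).toNat).map (pvF f q r) := by
  unfold generate_quot_geo_series
  rw [PySem.List.pyRange_one]
  have hm : (max n 1).toNat = (n - 1).toNat + 1 := by omega
  rw [hm, loopA_eq]

-- B's first pass builds the multiplier list and the running quotient
lemma loopB1_eq (f q r : Int) (m : Nat) :
    ((List.range m).map (fun k : Nat => (0 : Int) + k)).foldl
      (fun (st : List Int × Int) _ => (st.1 ++ [st.2], st.2 * r))
      ([f], q)
    = (f :: (List.range m).map (fun j => q * r ^ j), q * r ^ m) := by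
  induction m with
  | zero => simp
  | succ m ih =>
    rw [List.range_succ, List.map_append, List.foldl_append, ih]
    simp [pow_succ]; ring

-- B's second pass over the multiplier list is the cumulative product, i.e. the closed-form series
lemma loopB2_eq (f q r : Int) (m : Nat) :
    ((f :: (List.range m).map (fun j => q * r ^ j)).foldl
      (fun (st : List Int × Int) x => (st.1 ++ [st.2 * x], st.2 * x))
      (([] : List Int), 1))
    = ((List.range (m + 1)).map (pvF f q r), pvF f q r m) := by
  induction m with
  | zero => simp [pvF, pvT, List.range_succ]
  | succ m ih =>
    rw [List.range_succ (n := m), List.map_append, ← List.cons_append, List.foldl_append, ih]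
    simp only [List.map_cons, List.map_nil, List.foldl_cons, List.foldl_nil]
    rw [pvF_succ, List.range_succ (n := m + 1), List.map_append]
    simp

lemma alt_eq_map (f q r n : Int) :
    generate_quot_geo_series_alt f q r n
      = (List.range (max n 1).toNat).map (pvF f q r) := by
  unfold generate_quot_geo_series_alt
  rw [PySem.List.pyRange_one]
  rw [show (max (n - 1) 0 - 0 : Int) = max (n - 1) 0 from sub_zero _]
  rw [loopB1_eq]
  dsimp only
  rw [loopB2_eq]
  have hm : (max (n - 1) 0).toNat + 1 = (max n 1).toNat := by omega
  rw [hm]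

-- ===== VERDICT (by name: the statement is the Claim_ definition above) =====
theorem generate_quot_geo_series_spec : Claim_equal_generate_quot_geo_series := by
  intro f q r n _
  unfold Spec_generate_quot_geo_series
  rw [a_eq_map, alt_eq_map]
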